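-- pv_equiv track=rewrite | github.com/CDBiddulph/scaffold-learning | experiments/crosswords_20250711_195402/scaffolds/5-1-1-4-0/scaffold.py | extract_answers_from_grid
-- ===== SOURCE A (Python) =====
-- def find_clue_position(clue_num, grid, direction):
--     """Find the starting position of a clue in the grid"""
--     height = len(grid)
--     width = len(grid[0]) if height > 0 else 0
--     current_num = 1
--
--     for row in range(height):
--         for col in range(width):
--             if grid[row][col] == ".":
--                 continue
--
--             starts_across = (
--                 (col == 0 or grid[row][col - 1] == ".")
--                 and col + 1 < width
--                 and grid[row][col + 1] != "."
--             )
--             starts_down = (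
--                 (row == 0 or grid[row - 1][col] == ".")
--                 and row + 1 < height
--                 and grid[row + 1][col] != "."
--             )
--
--             if starts_across or starts_down:
--                 if current_num == clue_num:
--                     return (row, col)
--                 current_num += 1
--
--     return None
--
-- def extract_answers_from_grid(grid, across_clues, down_clues):
--     """Extract answers from completed grid"""
--     across_answers = {}
--     down_answers = {}
--
--     # Extract across answers
--     for clue_num in across_clues:
--         pos = find_clue_position(clue_num, grid, 'across')
--         if pos:
--             row, col = pos
--             answer = ""
--             while col < len(grid[0]) and grid[row][col] != ".":
--                 answer += grid[row][col]
--                 col += 1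
--             if answer:
--                 across_answers[clue_num] = answer
--
--     # Extract down answers
--     for clue_num in down_clues:
--         pos = find_clue_position(clue_num, grid, 'down')
--         if pos:
--             row, col = pos
--             answer = ""
--             while row < len(grid) and grid[row][col] != ".":
--                 answer += grid[row][col]
--                 row += 1
--             if answer:
--                 down_answers[clue_num] = answer
--
--     return across_answers, down_answers
-- ===== SOURCE B (Python) =====
-- def extract_answers_from_grid(grid, across_clues, down_clues):
--     """Extract answers from completed grid: one numbering pass that records every
--     numbered cell's across and down words keyed by clue number, then per-clue lookups."""
--     height = len(grid)
--     width = len(grid[0]) if height else 0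
--
--     def word(cells):
--         w = ""
--         for cell in cells:
--             if cell == ".":
--                 return w
--             w += cell
--         return w
--
--     across_at = {}
--     down_at = {}
--     num = 0
--     for r in range(height):
--         for c in range(width):
--             if grid[r][c] == ".":
--                 continue
--             if ((c == 0 or grid[r][c - 1] == ".") and c + 1 < width and grid[r][c + 1] != ".") or \
--                ((r == 0 or grid[r - 1][c] == ".") and r + 1 < height and grid[r + 1][c] != "."):
--                 num += 1
--                 across_at[num] = word(grid[r][c:width])
--                 down_at[num] = word([grid[i][c] for i in range(r, height)])
--
--     across_answers = {n: across_at[n] for n in across_clues if n in across_at and across_at[n]}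
--     down_answers = {n: down_at[n] for n in down_clues if n in down_at and down_at[n]}
--     return across_answers, down_answers
-- ===== Notes on version B (the rewrite author's own statement) =====
-- stated objective: faster
-- what changed: A rescans the whole grid once per clue to locate its number and then walks the word cell by cell; B makes one numbering pass that records every numbered cell's across word and down word in two dicts keyed by clue number, so each clue is answered by a single dict lookup.
-- outside the precondition, e.g. on extract_answers_from_grid([['A', 'B'], ['C']], [], []): A returns ({}, {}), B raises IndexError
import Mathlib
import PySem

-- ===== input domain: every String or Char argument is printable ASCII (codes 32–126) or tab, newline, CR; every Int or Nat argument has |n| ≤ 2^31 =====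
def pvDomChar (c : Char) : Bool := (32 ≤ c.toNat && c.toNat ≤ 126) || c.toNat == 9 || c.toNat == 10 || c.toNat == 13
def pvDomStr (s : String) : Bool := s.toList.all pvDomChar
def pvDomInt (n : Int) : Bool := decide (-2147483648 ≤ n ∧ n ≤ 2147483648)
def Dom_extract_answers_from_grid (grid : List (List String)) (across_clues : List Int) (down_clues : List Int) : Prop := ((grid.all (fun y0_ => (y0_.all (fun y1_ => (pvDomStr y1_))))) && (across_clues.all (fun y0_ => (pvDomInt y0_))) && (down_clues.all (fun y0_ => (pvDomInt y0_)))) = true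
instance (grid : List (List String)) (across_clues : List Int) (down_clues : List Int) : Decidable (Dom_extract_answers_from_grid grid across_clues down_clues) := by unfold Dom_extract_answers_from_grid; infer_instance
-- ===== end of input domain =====

-- B replaces A's per-clue grid rescans and cell-by-cell word walks by ONE numbering pass that
-- stores each numbered cell's across word and down word in dicts, then answers clues by lookup
-- (equality of RETURN values).

-- ===== PORT A =====
-- total cell access: under Pre_ every index the Python touches is in range, so getD is exact there
def pvCellA (grid : List (List String)) (r c : Nat) : String := (grid.getD r []).getD c ""

def pvStartsA (grid : List (List String)) (h w r c : Nat) : Bool :=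
  ((c == 0 || pvCellA grid r (c - 1) == ".") && decide (c + 1 < w) && !(pvCellA grid r (c + 1) == "."))
  || ((r == 0 || pvCellA grid (r - 1) c == ".") && decide (r + 1 < h) && !(pvCellA grid (r + 1) c == "."))

-- the body of A's nested scan loop: Sum.inl = "already returned", Sum.inr k = "current_num is k"
def pvFindStep (grid : List (List String)) (h w : Nat) (clue : Int) (st : Sum (Nat × Nat) Int) (rc : Nat × Nat) : Sum (Nat × Nat) Int :=
  match st with
  | .inl p => .inl p
  | .inr k =>
    if pvCellA grid rc.1 rc.2 == "." then .inr k
    else if pvStartsA grid h w rc.1 rc.2 then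
      (if k == clue then .inl rc else .inr (k + 1))
    else .inr k

def find_clue_position (clue_num : Int) (grid : List (List String)) : Option (Nat × Nat) :=
  let height := grid.length
  let width := if 0 < height then (grid.headD []).length else 0
  match (List.range height).foldl (fun st row => (List.range width).foldl (fun st col => pvFindStep grid height width clue_num st (row, col)) st) (Sum.inr 1) with
  | .inl p => some p
  | .inr _ => none

-- A's across while-loop: answer += grid[row][col]; col += 1
def pvReadAcrossA (grid : List (List String)) (w r c : Nat) (ans : String) : String :=
  if _h : c < w ∧ ¬ pvCellA grid r c == "." then
    pvReadAcrossA grid w r (c + 1) (ans ++ pvCellA grid r c)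
  else ans
termination_by w - c
decreasing_by omega

-- A's down while-loop
def pvReadDownA (grid : List (List String)) (h r c : Nat) (ans : String) : String :=
  if _hh : r < h ∧ ¬ pvCellA grid r c == "." then
    pvReadDownA grid h (r + 1) c (ans ++ pvCellA grid r c)
  else ans
termination_by h - r
decreasing_by omega

def extract_answers_from_grid (grid : List (List String)) (across_clues : List Int) (down_clues : List Int) : (List (Int × String)) × (List (Int × String)) :=
  let across := across_clues.foldl (fun d clue_num =>
    match find_clue_position clue_num grid with
    | some (row, col) =>
        let answer := pvReadAcrossA grid (grid.headD []).length row col ""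
        if answer ≠ "" then d.insert clue_num answer else d
    | none => d) (PySem.Dict.empty : PySem.Dict Int String)
  let down := down_clues.foldl (fun d clue_num =>
    match find_clue_position clue_num grid with
    | some (row, col) =>
        let answer := pvReadDownA grid grid.length row col ""
        if answer ≠ "" then d.insert clue_num answer else d
    | none => d) (PySem.Dict.empty : PySem.Dict Int String)
  (across.items, down.items)

-- ===== PORT B =====
-- Source B's word(cells): walk the cell list, stop at ".", accumulate the string
def pvWordGo (acc : String) : List String → String
  | [] => acc
  | cell :: rest => if cell == "." then acc else pvWordGo (acc ++ cell) rest

-- grid[r][c:width] — Python list slice with the nonnegative bounds c, width: take then drop is exact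
def pvRowSlice (grid : List (List String)) (r c w : Nat) : List String :=
  ((grid.getD r []).take w).drop c

-- [grid[i][c] for i in range(r, height)]
def pvColCells (grid : List (List String)) (h r c : Nat) : List String :=
  (List.range' r (h - r)).map (fun i => (grid.getD i []).getD c "")

-- body of B's single scan: state = (across_at, down_at, num); on a start cell store both words
def pvScanStep (grid : List (List String)) (h w : Nat)
    (s : PySem.Dict Int String × PySem.Dict Int String × Int) (r c : Nat) :
    PySem.Dict Int String × PySem.Dict Int String × Int :=
  if (grid.getD r []).getD c "" == "." then s
  else if ((c == 0 || (grid.getD r []).getD (c - 1) "" == ".") && decide (c + 1 < w) && !((grid.getD r []).getD (c + 1) "" == "."))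
        || ((r == 0 || (grid.getD (r - 1) []).getD c "" == ".") && decide (r + 1 < h) && !((grid.getD (r + 1) []).getD c "" == ".")) then
    let n := s.2.2 + 1
    (s.1.insert n (pvWordGo "" (pvRowSlice grid r c w)),
     s.2.1.insert n (pvWordGo "" (pvColCells grid h r c)), n)
  else s

def extract_answers_from_grid_alt (grid : List (List String)) (across_clues : List Int) (down_clues : List Int) : (List (Int × String)) × (List (Int × String)) :=
  let height := grid.length
  let width := if 0 < height then (grid.headD []).length else 0
  let st := (List.range height).foldl (fun s r => (List.range width).foldl (fun s c => pvScanStep grid height width s r c) s)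
      ((PySem.Dict.empty : PySem.Dict Int String), (PySem.Dict.empty : PySem.Dict Int String), (0 : Int))
  -- dict comprehension {n: across_at[n] for n in across_clues if n in across_at and across_at[n]}
  let across := across_clues.foldl (fun d n =>
    match st.1.get? n with
    | some a => if a ≠ "" then d.insert n a else d
    | none => d) (PySem.Dict.empty : PySem.Dict Int String)
  let down := down_clues.foldl (fun d n =>
    match st.2.1.get? n with
    | some a => if a ≠ "" then d.insert n a else d
    | none => d) (PySem.Dict.empty : PySem.Dict Int String)
  (across.items, down.items)

-- ===== PRECONDITION & SPEC =====
-- Pre_ excludes ragged grids whose first row is longer than a later row: there A raises IndexError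
-- unless its scans happen to stop early (an accident of the clue lists), and B's numbering pass raises.
def Pre_extract_answers_from_grid (grid : List (List String)) (across_clues : List Int) (down_clues : List Int) : Prop :=
  ∀ row ∈ grid, (grid.headD []).length ≤ row.length
instance (grid : List (List String)) (across_clues : List Int) (down_clues : List Int) : Decidable (Pre_extract_answers_from_grid grid across_clues down_clues) := by unfold Pre_extract_answers_from_grid; infer_instance

def pvWitness_extract_answers_from_grid : List (List String) × List Int × List Int :=
  ([["A", "B"], ["C", "."]], [1], [1, 2])

def Spec_extract_answers_from_grid (grid : List (List String)) (across_clues : List Int) (down_clues : List Int) (out : (List (Int × String)) × (List (Int × String))) : Prop := out = extract_answers_from_grid_alt grid across_clues down_clues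
instance (grid : List (List String)) (across_clues : List Int) (down_clues : List Int) (out : (List (Int × String)) × (List (Int × String))) : Decidable (Spec_extract_answers_from_grid grid across_clues down_clues out) := by unfold Spec_extract_answers_from_grid; infer_instance

-- ===== CLAIM =====
def Claim_equal_extract_answers_from_grid : Prop := ∀ (grid : List (List String)) (across_clues : List Int) (down_clues : List Int), Dom_extract_answers_from_grid grid across_clues down_clues → Pre_extract_answers_from_grid grid across_clues down_clues → Spec_extract_answers_from_grid grid across_clues down_clues (extract_answers_from_grid grid across_clues down_clues)

-- ===== LEMMAS AND PROOFS =====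

theorem wordGo_acc (a : String) (l : List String) : pvWordGo a l = a ++ pvWordGo "" l := by
  induction l generalizing a with
  | nil => simp [pvWordGo]
  | cons x xs ih =>
    by_cases hx : x == "."
    · simp [pvWordGo, hx]
    · rw [pvWordGo, pvWordGo, if_neg (by simpa using hx), if_neg (by simpa using hx),
        ih (a ++ x), ih ("" ++ x)]
      simp [String.append_assoc]

theorem readAcross_eq (grid : List (List String)) (w r : Nat) :
    ∀ (n c : Nat) (ans : String), w - c = n →
      pvReadAcrossA grid w r c ans = ans ++ pvWordGo "" (pvRowSlice grid r c w) := by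
  intro n
  induction n with
  | zero =>
    intro c ans hn
    have hcw : ¬ c < w := by omega
    have hsl : pvRowSlice grid r c w = [] := by
      apply List.drop_eq_nil_of_le
      have := List.length_take_le w (grid.getD r [])
      omega
    rw [pvReadAcrossA, dif_neg (fun hc => hcw hc.1), hsl]
    simp [pvWordGo]
  | succ m ih =>
    intro c ans hn
    have hcw : c < w := by omega
    by_cases hcl : c < (grid.getD r []).length
    · have hct : c < ((grid.getD r []).take w).length := by
        simp only [List.length_take]; omega
      have hsl : pvRowSlice grid r c w
          = pvCellA grid r c :: pvRowSlice grid r (c + 1) w := by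
        unfold pvRowSlice
        rw [List.drop_eq_getElem_cons hct]
        congr 1
        rw [List.getElem_take]
        exact (List.getD_eq_getElem (grid.getD r []) "" hcl).symm
      by_cases hdot : pvCellA grid r c == "."
      · rw [pvReadAcrossA, dif_neg (fun hc => hc.2 hdot), hsl, pvWordGo, if_pos hdot]
        simp
      · rw [pvReadAcrossA, dif_pos ⟨hcw, hdot⟩, ih (c + 1) _ (by omega), hsl,
          pvWordGo, if_neg hdot, wordGo_acc ("" ++ pvCellA grid r c)]
        simp [String.append_assoc]
    · have hlen : (grid.getD r []).length ≤ c := by omega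
      have hcell : pvCellA grid r c = "" := List.getD_eq_default _ _ hlen
      have hsl : ∀ c', (grid.getD r []).length ≤ c' → pvRowSlice grid r c' w = [] := by
        intro c' hc'
        apply List.drop_eq_nil_of_le
        refine le_trans ?_ hc'
        rw [List.length_take]
        exact min_le_right _ _
      have hdot : ¬ (pvCellA grid r c == ".") = true := by simp [hcell]
      rw [pvReadAcrossA, dif_pos ⟨hcw, hdot⟩, ih (c + 1) _ (by omega),
        hsl c (by omega), hsl (c + 1) (by omega), hcell]
      simp [pvWordGo]

theorem readDown_eq (grid : List (List String)) (h c : Nat) :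
    ∀ (n r : Nat) (ans : String), h - r = n →
      pvReadDownA grid h r c ans = ans ++ pvWordGo "" (pvColCells grid h r c) := by
  intro n
  induction n with
  | zero =>
    intro r ans hn
    have hrh : ¬ r < h := by omega
    have hsl : pvColCells grid h r c = [] := by
      unfold pvColCells
      rw [show h - r = 0 from by omega]
      rfl
    rw [pvReadDownA, dif_neg (fun hc => hrh hc.1), hsl]
    simp [pvWordGo]
  | succ m ih =>
    intro r ans hn
    have hrh : r < h := by omega
    have hsl : pvColCells grid h r c = pvCellA grid r c :: pvColCells grid h (r + 1) c := by
      unfold pvColCells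
      rw [show h - r = m + 1 from by omega, List.range'_succ, List.map_cons,
        show h - (r + 1) = m from by omega]
      rfl
    by_cases hdot : pvCellA grid r c == "."
    · rw [pvReadDownA, dif_neg (fun hc => hc.2 hdot), hsl, pvWordGo, if_pos hdot]
      simp
    · rw [pvReadDownA, dif_pos ⟨hrh, hdot⟩, ih (r + 1) _ (by omega), hsl,
        pvWordGo, if_neg hdot, wordGo_acc ("" ++ pvCellA grid r c)]
      simp [String.append_assoc]

theorem foldl_findStep_inl (grid : List (List String)) (h w : Nat) (clue : Int) (p : Nat × Nat) :
    ∀ cs : List (Nat × Nat), cs.foldl (pvFindStep grid h w clue) (.inl p) = .inl p := by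
  intro cs; induction cs with
  | nil => rfl
  | cons x xs ih => simpa [pvFindStep] using ih

theorem foldl_findStep_none (grid : List (List String)) (h w : Nat) (clue : Int) :
    ∀ (cs : List (Nat × Nat)) (k : Int), clue < k →
      ∃ k', k ≤ k' ∧ cs.foldl (pvFindStep grid h w clue) (.inr k) = .inr k' := by
  intro cs; induction cs with
  | nil => exact fun k hk => ⟨k, le_refl _, rfl⟩
  | cons x xs ih =>
    intro k hk
    by_cases hc : pvCellA grid x.1 x.2 == "."
    · simpa [pvFindStep, hc] using ih k hk
    · by_cases hs : pvStartsA grid h w x.1 x.2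
      · have hne : (k == clue) = false := by simp; omega
        obtain ⟨k', hk', he⟩ := ih (k + 1) (by omega)
        exact ⟨k', by omega, by simpa [pvFindStep, hc, hs, hne] using he⟩
      · simpa [pvFindStep, hc, hs] using ih k hk

-- the heart of the proof: B's scan and A's per-clue search agree, key by key
theorem scanStep_eq (grid : List (List String)) (h w : Nat)
    (s : PySem.Dict Int String × PySem.Dict Int String × Int) (r c : Nat) :
    pvScanStep grid h w s r c
      = if pvCellA grid r c == "." then s
        else if pvStartsA grid h w r c then
          (s.1.insert (s.2.2 + 1) (pvWordGo "" (pvRowSlice grid r c w)),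
           s.2.1.insert (s.2.2 + 1) (pvWordGo "" (pvColCells grid h r c)), s.2.2 + 1)
        else s := rfl

theorem scanStep_vs_findStep (grid : List (List String)) (h w : Nat) (n : Int) :
    ∀ (cs : List (Nat × Nat)) (k : Int) (da dd : PySem.Dict Int String),
      (∀ m : Int, k + 1 ≤ m → da.get? m = none) →
      (∀ m : Int, k + 1 ≤ m → dd.get? m = none) →
      ((cs.foldl (fun s rc => pvScanStep grid h w s rc.1 rc.2) (da, dd, k)).1.get? n
        = if k + 1 ≤ n then
            (match cs.foldl (pvFindStep grid h w n) (.inr (k + 1)) with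
             | .inl p => some (pvWordGo "" (pvRowSlice grid p.1 p.2 w)) | .inr _ => none)
          else da.get? n)
      ∧ ((cs.foldl (fun s rc => pvScanStep grid h w s rc.1 rc.2) (da, dd, k)).2.1.get? n
        = if k + 1 ≤ n then
            (match cs.foldl (pvFindStep grid h w n) (.inr (k + 1)) with
             | .inl p => some (pvWordGo "" (pvColCells grid h p.1 p.2)) | .inr _ => none)
          else dd.get? n) := by
  intro cs
  induction cs with
  | nil =>
    intro k da dd hda hdd
    constructor
    · by_cases hkn : k + 1 ≤ n <;> simp [List.foldl, hkn, hda n]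
    · by_cases hkn : k + 1 ≤ n <;> simp [List.foldl, hkn, hdd n]
  | cons x xs ih =>
    intro k da dd hda hdd
    rw [List.foldl_cons, List.foldl_cons, scanStep_eq]
    by_cases hc : pvCellA grid x.1 x.2 == "."
    · rw [if_pos hc]
      have hstep : pvFindStep grid h w n (.inr (k + 1)) x = .inr (k + 1) := by
        simp [pvFindStep, hc]
      rw [hstep]
      exact ih k da dd hda hdd
    · rw [if_neg hc]
      by_cases hs : pvStartsA grid h w x.1 x.2
      · rw [if_pos hs]
        have hstep : pvFindStep grid h w n (.inr (k + 1)) x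
            = if (k + 1 : Int) == n then .inl x else .inr (k + 1 + 1) := by
          simp [pvFindStep, hc, hs]
        have hda' : ∀ m : Int, k + 1 + 1 ≤ m →
            (da.insert (k + 1) (pvWordGo "" (pvRowSlice grid x.1 x.2 w))).get? m = none := by
          intro m hm
          rw [PySem.Dict.get?_insert_of_ne _ _ (by omega)]
          exact hda m (by omega)
        have hdd' : ∀ m : Int, k + 1 + 1 ≤ m →
            (dd.insert (k + 1) (pvWordGo "" (pvColCells grid h x.1 x.2))).get? m = none := by
          intro m hm
          rw [PySem.Dict.get?_insert_of_ne _ _ (by omega)]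
          exact hdd m (by omega)
        obtain ⟨iha, ihd⟩ := ih (k + 1) _ _ hda' hdd'
        rw [hstep]
        by_cases hkn : (k + 1 : Int) = n
        · subst hkn
          have hif : ((k + 1 : Int) == k + 1) = true := by simp
          rw [if_pos hif, foldl_findStep_inl]
          have hlt : ¬ (k + 1 + 1 ≤ k + 1) := by omega
          constructor
          · rw [iha, if_neg hlt, PySem.Dict.get?_insert_self, if_pos (le_refl _)]
          · rw [ihd, if_neg hlt, PySem.Dict.get?_insert_self, if_pos (le_refl _)]
        · rw [if_neg (show ¬ ((k + 1 : Int) == n) = true by simp [hkn])]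
          by_cases hle : k + 1 ≤ n
          · have h2 : k + 1 + 1 ≤ n := by omega
            constructor
            · rw [iha, if_pos h2, if_pos hle]
            · rw [ihd, if_pos h2, if_pos hle]
          · have h2 : ¬ (k + 1 + 1 ≤ n) := by omega
            constructor
            · rw [iha, if_neg h2, if_neg hle,
                PySem.Dict.get?_insert_of_ne da _ (by omega)]
            · rw [ihd, if_neg h2, if_neg hle,
                PySem.Dict.get?_insert_of_ne dd _ (by omega)]
      · rw [if_neg hs]
        have hstep : pvFindStep grid h w n (.inr (k + 1)) x = .inr (k + 1) := by
          simp [pvFindStep, hc, hs]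
        rw [hstep]
        exact ih k da dd hda hdd

theorem nested_foldl_eq {σ : Type} (h w : Nat) (f : σ → Nat × Nat → σ) (init : σ) :
    (List.range h).foldl (fun st row => (List.range w).foldl (fun st col => f st (row, col)) st) init
      = ((List.range h).flatMap (fun r => (List.range w).map (fun c => (r, c)))).foldl f init := by
  rw [List.foldl_flatMap]
  simp [List.foldl_map]

theorem width_eq (grid : List (List String)) :
    (if 0 < grid.length then (grid.headD []).length else 0) = (grid.headD []).length := by
  cases grid <;> simp

-- ===== VERDICT =====
theorem nested_foldl_eq2 {σ : Type} (h w : Nat) (f : σ → Nat → Nat → σ) (init : σ) :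
    (List.range h).foldl (fun st row => (List.range w).foldl (fun st col => f st row col) st) init
      = ((List.range h).flatMap (fun r => (List.range w).map (fun c => (r, c)))).foldl (fun st rc => f st rc.1 rc.2) init := by
  rw [List.foldl_flatMap]
  simp [List.foldl_map]

theorem scan_get (grid : List (List String)) (n : Int) :
    (((List.range grid.length).foldl (fun s r => (List.range (if 0 < grid.length then (grid.headD []).length else 0)).foldl (fun s c => pvScanStep grid grid.length (if 0 < grid.length then (grid.headD []).length else 0) s r c) s) ((PySem.Dict.empty : PySem.Dict Int String), (PySem.Dict.empty : PySem.Dict Int String), (0 : Int))).1.get? n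
      = (find_clue_position n grid).map (fun p => pvWordGo "" (pvRowSlice grid p.1 p.2 (if 0 < grid.length then (grid.headD []).length else 0))))
    ∧ (((List.range grid.length).foldl (fun s r => (List.range (if 0 < grid.length then (grid.headD []).length else 0)).foldl (fun s c => pvScanStep grid grid.length (if 0 < grid.length then (grid.headD []).length else 0) s r c) s) ((PySem.Dict.empty : PySem.Dict Int String), (PySem.Dict.empty : PySem.Dict Int String), (0 : Int))).2.1.get? n
      = (find_clue_position n grid).map (fun p => pvWordGo "" (pvColCells grid grid.length p.1 p.2))) := by
  unfold find_clue_position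
  dsimp only
  set h := grid.length with hh
  set w := if 0 < grid.length then (grid.headD []).length else 0 with hw
  rw [nested_foldl_eq2 h w (fun s r c => pvScanStep grid h w s r c),
    nested_foldl_eq h w (pvFindStep grid h w n)]
  set cs := (List.range h).flatMap (fun r => (List.range w).map (fun c => (r, c))) with hcs
  obtain ⟨ha, hd⟩ := scanStep_vs_findStep grid h w n cs 0 PySem.Dict.empty PySem.Dict.empty
    (fun m _ => PySem.Dict.get?_empty m) (fun m _ => PySem.Dict.get?_empty m)
  rw [zero_add] at ha hd
  constructor
  · rw [ha]
    by_cases h1 : (1 : Int) ≤ n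
    · rw [if_pos h1]
      cases cs.foldl (pvFindStep grid h w n) (.inr 1) <;> simp
    · obtain ⟨k', _, he⟩ := foldl_findStep_none grid h w n cs 1 (by omega)
      rw [if_neg h1, he, PySem.Dict.get?_empty]
      rfl
  · rw [hd]
    by_cases h1 : (1 : Int) ≤ n
    · rw [if_pos h1]
      cases cs.foldl (pvFindStep grid h w n) (.inr 1) <;> simp
    · obtain ⟨k', _, he⟩ := foldl_findStep_none grid h w n cs 1 (by omega)
      rw [if_neg h1, he, PySem.Dict.get?_empty]
      rfl

-- ===== VERDICT =====
theorem extract_answers_from_grid_spec : Claim_equal_extract_answers_from_grid := by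
  intro grid ac dc _dom _pre
  unfold Spec_extract_answers_from_grid extract_answers_from_grid extract_answers_from_grid_alt
  dsimp only
  obtain hacross : ∀ (d : PySem.Dict Int String) (n : Int),
      (fun (d : PySem.Dict Int String) clue_num =>
        match find_clue_position clue_num grid with
        | some (row, col) =>
            let answer := pvReadAcrossA grid (grid.headD []).length row col ""
            if answer ≠ "" then d.insert clue_num answer else d
        | none => d) d n
      = (fun (d : PySem.Dict Int String) n =>
        match (((List.range grid.length).foldl (fun s r => (List.range (if 0 < grid.length then (grid.headD []).length else 0)).foldl (fun s c => pvScanStep grid grid.length (if 0 < grid.length then (grid.headD []).length else 0) s r c) s) ((PySem.Dict.empty : PySem.Dict Int String), (PySem.Dict.empty : PySem.Dict Int String), (0 : Int))).1.get? n) with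
        | some a => if a ≠ "" then d.insert n a else d
        | none => d) d n := by
    intro d n
    beta_reduce
    rw [(scan_get grid n).1]
    cases hf : find_clue_position n grid with
    | none => rfl
    | some p =>
      obtain ⟨r, c⟩ := p
      simp only [Option.map_some]
      rw [readAcross_eq grid (grid.headD []).length r ((grid.headD []).length - c) c "" rfl,
        width_eq]
      simp [String.empty_append]
  obtain hdown : ∀ (d : PySem.Dict Int String) (n : Int),
      (fun (d : PySem.Dict Int String) clue_num =>
        match find_clue_position clue_num grid with
        | some (row, col) =>
            let answer := pvReadDownA grid grid.length row col ""
            if answer ≠ "" then d.insert clue_num answer else d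
        | none => d) d n
      = (fun (d : PySem.Dict Int String) n =>
        match (((List.range grid.length).foldl (fun s r => (List.range (if 0 < grid.length then (grid.headD []).length else 0)).foldl (fun s c => pvScanStep grid grid.length (if 0 < grid.length then (grid.headD []).length else 0) s r c) s) ((PySem.Dict.empty : PySem.Dict Int String), (PySem.Dict.empty : PySem.Dict Int String), (0 : Int))).2.1.get? n) with
        | some a => if a ≠ "" then d.insert n a else d
        | none => d) d n := by
    intro d n
    beta_reduce
    rw [(scan_get grid n).2]
    cases hf : find_clue_position n grid with
    | none => rfl
    | some p =>
      obtain ⟨r, c⟩ := p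
      simp only [Option.map_some]
      rw [readDown_eq grid grid.length c (grid.length - r) r "" rfl]
      simp [String.empty_append]
  rw [funext (fun d => funext (fun n => hacross d n)),
    funext (fun d => funext (fun n => hdown d n))]
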